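-- pv_equiv track=rewrite | github.com/oooJordan/Python-lab | HW2/HWfile.py | by_freq
-- ===== SOURCE A (Python) =====
-- def by_freq(words):
--
--     freq = {}
--     for word in words:
--         for position, letter in enumerate(word):
--             freq[position] = freq.get(position, {})
--             freq[position][letter] = freq[position].get(letter, 0) + 1
--     result = []
--     for position in freq:
--         result.append(min(freq[position].items(),
--             key=lambda x: (-x[1], x[0]))[0])
--     return "".join(result)
-- ===== SOURCE B (Python) =====
-- def by_freq(words):
--     max_len = max((len(w) for w in words), default=0)
--     out = []
--     for pos in range(max_len):
--         letters = [w[pos] for w in words if pos < len(w)]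
--         out.append(min(set(letters), key=lambda c: (-letters.count(c), c)))
--     return "".join(out)
-- ===== Notes on version B (the rewrite author's own statement) =====
-- stated objective: alternative
-- what changed: A makes one word-major pass building a dict of per-position letter-count dicts and then scans that structure; B transposes the loop: it computes max_len and, position-major, gathers each column's letters and picks min(set(column)) under the (-count, letter) key, with no nested dict ever built.
import Mathlib
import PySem

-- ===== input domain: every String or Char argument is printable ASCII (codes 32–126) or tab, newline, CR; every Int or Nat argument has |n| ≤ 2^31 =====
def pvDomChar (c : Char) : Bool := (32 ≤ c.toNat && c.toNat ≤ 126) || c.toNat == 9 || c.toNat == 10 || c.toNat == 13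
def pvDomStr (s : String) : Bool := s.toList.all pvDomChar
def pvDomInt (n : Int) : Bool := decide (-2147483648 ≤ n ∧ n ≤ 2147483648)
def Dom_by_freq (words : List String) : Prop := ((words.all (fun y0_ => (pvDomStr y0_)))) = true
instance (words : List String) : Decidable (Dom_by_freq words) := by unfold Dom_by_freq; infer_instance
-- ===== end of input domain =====

-- B replaces A's word-major nested-dict tally by a position-major scan: per position it gathers the
-- column of letters and takes min(set(letters)) under the (-count, letter) key (objective: simpler).

-- ===== PORT A =====
-- freq[position] = freq.get(position, {}); freq[position][letter] = freq[position].get(letter, 0) + 1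
def freqStep (freq : PySem.Dict Int (PySem.Dict Char Int)) (pc : Int × Char) :
    PySem.Dict Int (PySem.Dict Char Int) :=
  let freq1 := freq.insert pc.1 (freq.getD pc.1 PySem.Dict.empty)
  freq1.insert pc.1 ((freq1.getD pc.1 PySem.Dict.empty).insert pc.2
    ((freq1.getD pc.1 PySem.Dict.empty).getD pc.2 0 + 1))

def freqWord (freq : PySem.Dict Int (PySem.Dict Char Int)) (word : String) :
    PySem.Dict Int (PySem.Dict Char Int) :=
  (PySem.List.enumerate word.toList).foldl freqStep freq

-- min(items, key=lambda x: (-x[1], x[0]))[0]; Python would raise only on an empty items list,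
-- which never occurs here (every inner dict holds at least one letter) — the port returns none there.
def pickA (items : List (Char × Int)) : Option Char :=
  (PySem.List.min2? items (fun x => -x.2) (fun x => x.1)).map (fun x => x.1)

def by_freq (words : List String) : String :=
  let freq := words.foldl freqWord PySem.Dict.empty
  String.mk (freq.keys.foldl (fun result position =>
    result ++ (pickA (freq.getD position PySem.Dict.empty).items).toList) [])

-- ===== PORT B =====
-- letters = [w[pos] for w in words if pos < len(w)]
def lettersB (words : List String) (pos : Int) : List Char :=
  words.foldl (fun acc w =>
    if pos < PySem.Str.len w then acc ++ [PySem.List.pyGetD w.toList pos ' '] else acc) []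

-- min(set(letters), key=lambda c: (-letters.count(c), c)); the key is injective on the set, so the
-- set's iteration order cannot matter; Python would raise only on an empty set, which never occurs
-- (pos < max_len) — the port returns none there.
def pickB (letters : List Char) : Option Char :=
  PySem.List.min2? (PySem.Set.ofList letters) (fun c => -((letters.count c : Int))) (fun c => c)

def by_freq_alt (words : List String) : String :=
  let maxLen := PySem.List.maxD (words.map (fun w => PySem.Str.len w)) (fun x => x) 0
  String.mk ((PySem.List.pyRange 0 maxLen 1).foldl (fun out pos =>
    out ++ (pickB (lettersB words pos)).toList) [])

-- ===== PRECONDITION & SPEC =====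
def Spec_by_freq (words : List String) (out : String) : Prop := out = by_freq_alt words
instance (words : List String) (out : String) : Decidable (Spec_by_freq words out) := by unfold Spec_by_freq; infer_instance

-- ===== CLAIM (what is proved, stated in full; the proofs are below) =====
def Claim_equal_by_freq : Prop := ∀ (words : List String), Dom_by_freq words → Spec_by_freq words (by_freq words)

-- ===== LEMMAS AND PROOFS =====

-- the column of letters at position p, in word order
def lettersAt (words : List String) (p : Int) : List Char :=
  (words.filter (fun w => p < PySem.Str.len w)).map (fun w => PySem.List.pyGetD w.toList p ' ')

-- length of the longest word
def maxM (words : List String) : Nat :=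
  words.foldl (fun acc w => max acc w.toList.length) 0

-- a dict with keys 0,…,m-1 in order and values g 0,…,g (m-1)
def mkRange (m : Nat) (g : Nat → PySem.Dict Char Int) : PySem.Dict Int (PySem.Dict Char Int) :=
  PySem.Dict.mk ((List.range m).map (fun (k : Nat) => ((k : Int), g k)))

theorem find?_mkRange (m : Nat) (g : Nat → PySem.Dict Char Int) (j : Nat) :
    ((List.range m).map (fun (k : Nat) => ((k : Int), g k))).find? (fun p => p.1 == (j : Int))
      = if j < m then some ((j : Int), g j) else none := by
  induction m with
  | zero => simp
  | succ m ih =>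
    rw [List.range_succ, List.map_append, List.find?_append, ih]
    by_cases hj : j < m
    · simp [hj, Nat.lt_succ_of_lt hj]
    · by_cases hj2 : j = m
      · subst hj2; simp
      · have : ¬ j < m + 1 := by omega
        simp [hj, this, Nat.cast_inj, Ne.symm hj2]

theorem get?_mkRange (m : Nat) (g : Nat → PySem.Dict Char Int) (j : Nat) :
    (mkRange m g).get? (j : Int) = if j < m then some (g j) else none := by
  simp only [PySem.Dict.get?, mkRange, find?_mkRange]
  by_cases hj : j < m <;> simp [hj]

theorem getD_mkRange (m : Nat) (g : Nat → PySem.Dict Char Int) (j : Nat) :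
    (mkRange m g).getD (j : Int) PySem.Dict.empty = if j < m then g j else PySem.Dict.empty := by
  rw [PySem.Dict.getD_eq_get?_getD, get?_mkRange]
  by_cases hj : j < m <;> simp [hj]

theorem contains_mkRange (m : Nat) (g : Nat → PySem.Dict Char Int) (j : Nat) :
    (mkRange m g).contains (j : Int) = decide (j < m) := by
  rw [PySem.Dict.contains_eq_isSome_get?, get?_mkRange]
  by_cases hj : j < m <;> simp [hj]

theorem mkRange_congr (m : Nat) (g g' : Nat → PySem.Dict Char Int)
    (h : ∀ k, k < m → g k = g' k) : mkRange m g = mkRange m g' := by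
  unfold mkRange
  congr 1
  apply List.map_congr_left
  intro k hk
  rw [h k (List.mem_range.mp hk)]

theorem insert_mkRange_lt (m : Nat) (g : Nat → PySem.Dict Char Int) (j : Nat) (v : PySem.Dict Char Int)
    (h : j < m) :
    (mkRange m g).insert (j : Int) v = mkRange m (fun k => if k = j then v else g k) := by
  simp only [PySem.Dict.insert, contains_mkRange m g j, h, decide_true, if_true]
  unfold mkRange
  congr 1
  rw [List.map_map]
  apply List.map_congr_left
  intro k hk
  by_cases hkj : k = j
  · subst hkj; simp
  · simp [Function.comp, Nat.cast_inj, hkj]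

theorem insert_mkRange_eq (m : Nat) (g : Nat → PySem.Dict Char Int) (v : PySem.Dict Char Int) :
    (mkRange m g).insert (m : Int) v = mkRange (m + 1) (fun k => if k = m then v else g k) := by
  simp only [PySem.Dict.insert, contains_mkRange m g m]
  rw [if_neg (by simp)]
  unfold mkRange
  congr 1
  rw [List.range_succ, List.map_append]
  congr 1
  · apply List.map_congr_left
    intro k hk
    simp [Nat.ne_of_lt (List.mem_range.mp hk)]
  · simp

theorem freqStep_eq (d : PySem.Dict Int (PySem.Dict Char Int)) (pc : Int × Char) :
    freqStep d pc = d.insert pc.1 ((d.getD pc.1 PySem.Dict.empty).modify pc.2 0 (· + 1)) := by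
  simp [freqStep, PySem.Dict.getD_insert_self, PySem.Dict.insert_insert_self, PySem.Dict.modify]

theorem lettersB_eq (words : List String) (pos : Int) :
    lettersB words pos = lettersAt words pos := by
  simp [lettersB, lettersAt, PySem.List.foldl_append_ite]

theorem maxM_append (ws : List String) (w : String) :
    maxM (ws ++ [w]) = max (maxM ws) w.toList.length := by
  simp [maxM]

theorem lettersAt_append (ws : List String) (w : String) (p : Int) :
    lettersAt (ws ++ [w]) p
      = lettersAt ws p ++ (if p < PySem.Str.len w then [PySem.List.pyGetD w.toList p ' '] else []) := by
  simp only [lettersAt, List.filter_append, List.map_append]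
  congr 1
  by_cases h : p < PySem.Str.len w
  · have h' : p < (w.length : Int) := by
      rw [PySem.Str.len_eq] at h; exact_mod_cast h
    simp [PySem.Str.len_eq, h']
  · have h' : ¬ p < (w.length : Int) := by
      rw [PySem.Str.len_eq] at h; intro hc; exact h (by exact_mod_cast hc)
    simp [PySem.Str.len_eq, h']

theorem lettersAt_nil_of_ge (ws : List String) (k : Nat) (h : maxM ws ≤ k) :
    lettersAt ws (k : Int) = [] := by
  have hb := (PySem.List.le_foldl_max_nat ws (fun w => w.toList.length) 0).2
  simp only [lettersAt, List.map_eq_nil_iff, List.filter_eq_nil_iff]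
  intro w hw
  have := hb w hw
  simp only [decide_eq_true_eq, not_lt, PySem.Str.len_eq]
  exact_mod_cast le_trans (le_trans this h) (le_refl k)

theorem min2?_foldl_map {α β κ₁ κ₂ : Type} [LT κ₁] [DecidableLT κ₁] [LT κ₂] [DecidableLT κ₂]
    (f : α → β) (l : List α) (k1 : β → κ₁) (k2 : β → κ₂) (acc : Option α) :
    (l.map f).foldl (fun acc x =>
      match acc with
      | none => some x
      | some m => if (decide (k1 x < k1 m) || !decide (k1 m < k1 x) && decide (k2 x < k2 m)) = true
                  then some x else some m) (acc.map f)
    = (l.foldl (fun acc x =>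
      match acc with
      | none => some x
      | some m => if (decide (k1 (f x) < k1 (f m)) || !decide (k1 (f m) < k1 (f x)) && decide (k2 (f x) < k2 (f m))) = true
                  then some x else some m) acc).map f := by
  induction l generalizing acc with
  | nil => simp
  | cons x t ih =>
    cases acc with
    | none => simpa using ih (some x)
    | some m =>
      simp only [List.map_cons, List.foldl_cons, Option.map_some]
      split_ifs with h
      · simpa using ih (some x)
      · simpa using ih (some m)

theorem min2?_map {α β κ₁ κ₂ : Type} [LT κ₁] [DecidableLT κ₁] [LT κ₂] [DecidableLT κ₂]
    (f : α → β) (l : List α) (k1 : β → κ₁) (k2 : β → κ₂) :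
    PySem.List.min2? (l.map f) k1 k2
      = (PySem.List.min2? l (fun a => k1 (f a)) (fun a => k2 (f a))).map f := by
  unfold PySem.List.min2?
  simpa only [Option.map_none] using min2?_foldl_map f l k1 k2 none

theorem pick_eq (l : List Char) : pickA (PySem.Dict.counter l).items = pickB l := by
  rw [pickA, PySem.Dict.items_counter, min2?_map]
  rw [pickB]
  simp [Option.map_map, Function.comp_def]

theorem maxM_cast_aux (t : List String) (a : Nat) :
    (t.map (fun w => PySem.Str.len w)).foldl max (a : Int)
      = ((t.foldl (fun acc w => max acc w.toList.length) a : Nat) : Int) := by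
  induction t generalizing a with
  | nil => simp
  | cons h t ih =>
    simp only [List.map_cons, List.foldl_cons]
    rw [show PySem.Str.len h = ((h.toList.length : Nat) : Int) from PySem.Str.len_eq h,
      ← Nat.cast_max, ih]

theorem maxM_cast (words : List String) :
    PySem.List.maxD (words.map (fun w => PySem.Str.len w)) (fun x => x) 0
      = (maxM words : Int) := by
  cases words with
  | nil => simp [PySem.List.maxD, PySem.List.max?, maxM]
  | cons h t =>
    simp only [PySem.List.maxD, List.map_cons, PySem.List.max?_id_cons, Option.getD_some, maxM]
    rw [show PySem.Str.len h = ((h.toList.length : Nat) : Int) from PySem.Str.len_eq h]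
    rw [maxM_cast_aux]
    simp only [List.foldl_cons]
    norm_num

theorem inner_loop (cs : List Char) : ∀ (s m : Nat) (g : Nat → PySem.Dict Char Int), s ≤ m →
    (PySem.List.enumerate cs (s : Int)).foldl freqStep (mkRange m g)
      = mkRange (max m (s + cs.length)) (fun k =>
          if s ≤ k ∧ k < s + cs.length then
            ((if k < m then g k else PySem.Dict.empty).modify (cs.getD (k - s) ' ') 0 (· + 1))
          else (if k < m then g k else PySem.Dict.empty)) := by
  induction cs with
  | nil =>
    intro s m g hs
    have hmax : max m (s + ([] : List Char).length) = m := by simp; omega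
    rw [PySem.List.enumerate_nil, List.foldl_nil, hmax]
    apply mkRange_congr
    intro k hk
    have hc : ¬ (s ≤ k ∧ k < s + ([] : List Char).length) := by simp
    simp [hk]
  | cons c cs ih =>
    intro s m g hs
    rw [PySem.List.enumerate_cons, List.foldl_cons, freqStep_eq, getD_mkRange]
    by_cases hsm : s < m
    · rw [if_pos hsm, insert_mkRange_lt m g s _ hsm,
        show ((s : Int) + 1) = ((s + 1 : Nat) : Int) by push_cast; ring,
        ih (s + 1) m _ hsm]
      have hmax : max m (s + 1 + cs.length) = max m (s + (c :: cs).length) := by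
        simp; omega
      rw [hmax]
      apply mkRange_congr
      intro k hk
      simp only [List.length_cons] at hk ⊢
      have hget : s + 1 ≤ k → cs.getD (k - (s + 1)) ' ' = (c :: cs).getD (k - s) ' ' := by
        intro h
        have hks : k - s = (k - (s + 1)) + 1 := by omega
        rw [hks, List.getD_cons_succ]
      split_ifs <;> first | rfl | (exfalso; omega) | (rw [hget (by omega)]) |
        (have hks : k = s := (by omega); subst hks; simp)
    · have hsm' : s = m := by omega
      subst hsm'
      rw [if_neg hsm, insert_mkRange_eq,
        show ((s : Int) + 1) = ((s + 1 : Nat) : Int) by push_cast; ring,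
        ih (s + 1) (s + 1) _ (le_refl _)]
      have hmax : max (s + 1) (s + 1 + cs.length) = max s (s + (c :: cs).length) := by
        simp; omega
      rw [hmax]
      apply mkRange_congr
      intro k hk
      simp only [List.length_cons] at hk ⊢
      have hget : s + 1 ≤ k → cs.getD (k - (s + 1)) ' ' = (c :: cs).getD (k - s) ' ' := by
        intro h
        have hks : k - s = (k - (s + 1)) + 1 := by omega
        rw [hks, List.getD_cons_succ]
      split_ifs <;> first | rfl | (exfalso; omega) | (rw [hget (by omega)]) |
        (have hks : k = s := (by omega); subst hks; simp)

theorem counter_lettersAt_append (ws : List String) (w : String) (k : Nat) :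
    PySem.Dict.counter (lettersAt (ws ++ [w]) (k : Int))
      = if k < w.toList.length then
          (PySem.Dict.counter (lettersAt ws (k : Int))).modify (w.toList.getD k ' ') 0 (· + 1)
        else PySem.Dict.counter (lettersAt ws (k : Int)) := by
  rw [lettersAt_append]
  by_cases hkw : k < w.toList.length
  · have hc : ((k : Int) < PySem.Str.len w) := by rw [PySem.Str.len_eq]; exact_mod_cast hkw
    rw [if_pos hc, if_pos hkw, PySem.Dict.counter_append_singleton, PySem.List.pyGetD_natCast]
  · have hc : ¬ ((k : Int) < PySem.Str.len w) := by
      rw [PySem.Str.len_eq]; intro hcon; exact hkw (by exact_mod_cast hcon)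
    rw [if_neg hc, if_neg hkw, List.append_nil]

theorem buildFreq_eq (ws : List String) :
    ws.foldl freqWord PySem.Dict.empty
      = mkRange (maxM ws) (fun k => PySem.Dict.counter (lettersAt ws (k : Int))) := by
  induction ws using List.reverseRecOn with
  | nil => rfl
  | append_singleton ws w ih =>
    rw [List.foldl_append, List.foldl_cons, List.foldl_nil, ih]
    show (PySem.List.enumerate w.toList ((0 : Nat) : Int)).foldl freqStep _ = _
    rw [inner_loop w.toList 0 (maxM ws) _ (Nat.zero_le _), maxM_append]
    have hmax : max (maxM ws) (0 + w.toList.length) = max (maxM ws) w.toList.length := by omega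
    rw [hmax]
    apply mkRange_congr
    intro k hk
    rw [counter_lettersAt_append]
    have hcnt : ∀ j : Nat, (if j < maxM ws then PySem.Dict.counter (lettersAt ws (j : Int))
        else PySem.Dict.empty) = PySem.Dict.counter (lettersAt ws (j : Int)) := by
      intro j
      by_cases hj : j < maxM ws
      · rw [if_pos hj]
      · rw [if_neg hj, lettersAt_nil_of_ge ws j (by omega)]
        rfl
    by_cases hkw : k < w.toList.length
    · have hc : (0 ≤ k ∧ k < 0 + w.toList.length) := by omega
      rw [if_pos hc, if_pos hkw, hcnt k]
      congr 1
    · have hc : ¬ (0 ≤ k ∧ k < 0 + w.toList.length) := by omega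
      rw [if_neg hc, if_neg hkw, hcnt k]

theorem keys_mkRange (m : Nat) (g : Nat → PySem.Dict Char Int) :
    (mkRange m g).keys = (List.range m).map (fun (k : Nat) => (k : Int)) := by
  simp [mkRange, PySem.Dict.keys, List.map_map, Function.comp_def]

-- ===== VERDICT (by name: the statement is the Claim_ definition above) =====
theorem by_freq_spec : Claim_equal_by_freq := by
  intro words _
  unfold Spec_by_freq
  simp only [by_freq, by_freq_alt]
  rw [buildFreq_eq, maxM_cast, PySem.List.pyRange_zero_natCast, keys_mkRange,
    PySem.List.foldl_append_eq_flatMap, PySem.List.foldl_append_eq_flatMap,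
    List.nil_append, List.nil_append, List.flatMap_map, List.flatMap_map]
  congr 1
  apply List.flatMap_congr
  intro k hk
  rw [getD_mkRange, if_pos (List.mem_range.mp hk), pick_eq, lettersB_eq]
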